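-- pv_equiv track=rewrite | github.com/TabulateJarl8/ti842py | ti842py/parsing_utils.py | closeOpen
-- ===== SOURCE A (Python) =====
-- def closeOpen(string):
-- 	if string.count("\"") % 2 != 0:
-- 		string = string + "\""
--
-- 	# Split string by "
-- 	splitString = string.split('"')
-- 	open_paren = 0
-- 	closed_paren = 0
--
-- 	for i in range(0, len(splitString), 2): # skip all even elements since those are in between quotes
-- 		open_paren += splitString[i].count('(')
-- 		closed_paren += splitString[i].count(')')
--
-- 	# Add needed closing parentheses
-- 	string = string + ')' * (open_paren - closed_paren)
-- 	return string
-- ===== SOURCE B (Python) =====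
-- def closeOpen(string):
-- 	if string.count("\"") % 2 != 0:
-- 		string = string + "\""
--
-- 	# Single pass: toggle in_string on '"', track paren depth outside quotes
-- 	in_string = False
-- 	depth = 0
-- 	for ch in string:
-- 		if ch == '"':
-- 			in_string = not in_string
-- 		elif not in_string:
-- 			if ch == '(':
-- 				depth += 1
-- 			elif ch == ')':
-- 				depth -= 1
--
-- 	return string + ')' * depth
-- ===== Notes on version B (the rewrite author's own statement) =====
-- stated objective: simpler
-- what changed: Replaces the split-on-quote list plus even-index .count loop with a single character scan maintaining an in_string toggle and a signed paren depth.
import Mathlib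
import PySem

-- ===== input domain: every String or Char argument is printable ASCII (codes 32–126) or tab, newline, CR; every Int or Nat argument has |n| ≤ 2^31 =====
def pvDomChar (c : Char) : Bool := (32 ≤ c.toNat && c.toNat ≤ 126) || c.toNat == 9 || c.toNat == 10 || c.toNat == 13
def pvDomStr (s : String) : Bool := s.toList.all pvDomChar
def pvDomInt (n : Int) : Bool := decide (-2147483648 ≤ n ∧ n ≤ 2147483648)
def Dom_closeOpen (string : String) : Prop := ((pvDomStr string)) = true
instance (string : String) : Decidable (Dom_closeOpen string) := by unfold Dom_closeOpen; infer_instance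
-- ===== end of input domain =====

-- B replaces A's split-on-quote list and even-index count loop by one character scan
-- with an in_string toggle and a signed paren depth (objective: simpler; same cost).

-- ===== PORT A =====
-- Port of A, on List Char (PySem string primitives are defined on List Char).
-- string.count('"') -> PySem.Chars.count; string.split('"') -> PySem.Chars.splitOn
-- (sep is the non-empty literal '"', so Python's split never raises);
-- range(0, len(..), 2) -> PySem.List.pyRange; list indexing is always in range here, pyGetD with
-- default [] is the faithful total form; ')' * n -> PySem.List.pyRepeat (empty for n ≤ 0).
def closeOpen (string : String) : String :=
  let cs := string.toList
  let t := if PySem.Chars.count cs ['"'] % 2 ≠ 0 then cs ++ ['"'] else cs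
  let splitString := PySem.Chars.splitOn t ['"']
  let oc := (PySem.List.pyRange 0 (splitString.length : Int) 2).foldl
      (fun (oc : Int × Int) i =>
        (oc.1 + (PySem.Chars.count (PySem.List.pyGetD splitString i []) ['('] : Int),
         oc.2 + (PySem.Chars.count (PySem.List.pyGetD splitString i []) [')'] : Int))) (0, 0)
  String.ofList (t ++ PySem.List.pyRepeat [')'] (oc.1 - oc.2))

-- ===== PORT B =====
-- Port of B: same odd-quote append, then a single foldl over the characters carrying
-- (in_string, depth); finally string + ')' * depth.
def closeOpen_alt (string : String) : String :=
  let cs := string.toList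
  let t := if PySem.Chars.count cs ['"'] % 2 ≠ 0 then cs ++ ['"'] else cs
  let st := t.foldl
      (fun (s : Bool × Int) ch =>
        if ch = '"' then (!s.1, s.2)
        else if s.1 = false then
          (if ch = '(' then (s.1, s.2 + 1)
           else if ch = ')' then (s.1, s.2 - 1)
           else s)
        else s) (false, 0)
  String.ofList (t ++ PySem.List.pyRepeat [')'] st.2)

-- ===== PRECONDITION & SPEC =====
def Spec_closeOpen (string : String) (out : String) : Prop := out = closeOpen_alt string
instance (string : String) (out : String) : Decidable (Spec_closeOpen string out) := by unfold Spec_closeOpen; infer_instance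

-- ===== CLAIM (what is proved, stated in full; the proofs are below) =====
def Claim_equal_closeOpen : Prop := ∀ (string : String), Dom_closeOpen string → Spec_closeOpen string (closeOpen string)

-- ===== LEMMAS AND PROOFS =====

-- Python's s.count(sub) for a single-character sub is the character count.
lemma countgo_spec (c : Char) : ∀ (fuel : Nat) (l : List Char) (acc : Nat),
    l.length ≤ fuel → PySem.Chars.count.go [c] fuel l acc = acc + l.count c := by
  intro fuel
  induction fuel with
  | zero => intro l acc h; cases l with
    | nil => simp [PySem.Chars.count.go]
    | cons x xs => simp at h
  | succ n ih =>
    intro l acc h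
    cases l with
    | nil => simp [PySem.Chars.count.go]
    | cons x xs =>
      have hl : xs.length ≤ n := by simpa using h
      by_cases hx : x = c
      · simp [PySem.Chars.count.go, List.isPrefixOf, hx, ih _ _ hl]
        omega
      · simp [PySem.Chars.count.go, List.isPrefixOf, hx, ih _ _ hl, Ne.symm hx]

lemma count_singleton (s : List Char) (c : Char) : PySem.Chars.count s [c] = s.count c := by
  simp [PySem.Chars.count, countgo_spec c s.length s 0 le_rfl]

-- structural characterisation of split on the single character '"'
def split0 : List Char → List (List Char)
  | [] => [[]]
  | c :: cs =>
    if c = '"' then [] :: split0 cs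
    else match split0 cs with
      | [] => [[c]]
      | h :: t => (c :: h) :: t

def mapHead (f : List Char → List Char) : List (List Char) → List (List Char)
  | [] => []
  | h :: t => f h :: t

lemma split0_ne_nil (cs : List Char) : split0 cs ≠ [] := by
  cases cs with
  | nil => simp [split0]
  | cons c cs =>
    simp only [split0]
    split
    · simp
    · split <;> simp

lemma splitgo_spec : ∀ (fuel : Nat) (l cur : List Char) (acc : List (List Char)),
    l.length ≤ fuel →
    PySem.Chars.splitOn.go ['"'] fuel l cur acc
      = acc.reverse ++ mapHead (cur.reverse ++ ·) (split0 l) := by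
  intro fuel
  induction fuel with
  | zero => intro l cur acc h; cases l with
    | nil => simp [PySem.Chars.splitOn.go, split0, mapHead]
    | cons x xs => simp at h
  | succ n ih =>
    intro l cur acc h
    cases l with
    | nil => simp [PySem.Chars.splitOn.go, split0, mapHead]
    | cons x xs =>
      have hl : xs.length ≤ n := by simpa using h
      by_cases hx : x = '"'
      · rcases hsp : split0 xs with _ | ⟨hd, tl⟩
        · exact absurd hsp (split0_ne_nil xs)
        · simp [PySem.Chars.splitOn.go, List.isPrefixOf, hx, ih _ _ _ hl, split0, hsp, mapHead]
      · rcases hsp : split0 xs with _ | ⟨hd, tl⟩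
        · exact absurd hsp (split0_ne_nil xs)
        · simp [PySem.Chars.splitOn.go, List.isPrefixOf, hx, ih _ _ _ hl, split0, hsp, mapHead]
          exact fun h => hx h.symm

lemma splitOn_eq_split0 (cs : List Char) : PySem.Chars.splitOn cs ['"'] = split0 cs := by
  have := splitgo_spec (cs.length + 1) cs [] [] (by omega)
  rcases h : split0 cs with _ | ⟨hd, tl⟩
  · exact absurd h (split0_ne_nil cs)
  · simpa [PySem.Chars.splitOn, h, mapHead] using this

-- the even-position segments (the ones outside quotes)
def evens : List (List Char) → List (List Char)
  | [] => []
  | [s] => [s]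
  | s :: _ :: r => s :: evens r

-- paren balance of one unquoted segment
def pdelta (s : List Char) : Int := (s.count '(' : Int) - (s.count ')' : Int)

def pdeltaC (c : Char) : Int := if c = '(' then 1 else if c = ')' then -1 else 0

lemma pdelta_nil : pdelta [] = 0 := by simp [pdelta]

lemma pdelta_cons (c : Char) (h : List Char) : pdelta (c :: h) = pdeltaC c + pdelta h := by
  unfold pdelta pdeltaC
  by_cases h1 : c = '(' <;> by_cases h2 : c = ')' <;> simp_all <;> omega

-- total balance A computes: sum of pdelta over the even-position segments
def ebal (segs : List (List Char)) : Int := ((evens segs).map pdelta).sum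

lemma ebal_cons_nil : ebal ([] :: split0 cs) = ebal ((split0 cs).tail) := by
  rcases h : split0 cs with _ | ⟨hd, tl⟩
  · exact absurd h (split0_ne_nil cs)
  · cases tl <;> simp [ebal, evens, pdelta_nil]

lemma ebal_consHead (c : Char) (h : List Char) (t : List (List Char)) :
    ebal ((c :: h) :: t) = pdeltaC c + ebal (h :: t) := by
  cases t with
  | nil => simp [ebal, evens, pdelta_cons]
  | cons x xs => simp [ebal, evens, pdelta_cons]; ring

-- B's scan computes the same balance
lemma foldB (cs : List Char) : ∀ (b : Bool) (d : Int),
    (cs.foldl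
      (fun (s : Bool × Int) ch =>
        if ch = '"' then (!s.1, s.2)
        else if s.1 = false then
          (if ch = '(' then (s.1, s.2 + 1)
           else if ch = ')' then (s.1, s.2 - 1)
           else s)
        else s) (b, d)).2
      = d + (if b then ebal ((split0 cs).tail) else ebal (split0 cs)) := by
  induction cs with
  | nil => intro b d; cases b <;> simp [split0, ebal, evens, pdelta_nil]
  | cons c cs ih =>
    intro b d
    by_cases hc : c = '"'
    · cases b with
      | false => simpa [hc, split0, ebal_cons_nil] using ih true d
      | true => simpa [hc, split0] using ih false d
    · rcases hsp : split0 cs with _ | ⟨hd, tl⟩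
      · exact absurd hsp (split0_ne_nil cs)
      · cases b with
        | false =>
          by_cases h1 : c = '(' <;> by_cases h2 : c = ')' <;>
            simp_all [split0, List.foldl_cons, ebal_consHead, pdeltaC] <;> ring
        | true =>
          simp_all [split0, List.foldl_cons]

-- A's strided loop reads exactly the even-position segments
lemma range_evens (segs : List (List Char)) :
    (List.range ((segs.length + 1) / 2)).map
      (fun k : Nat => PySem.List.pyGetD segs (2 * (k : Int)) []) = evens segs := by
  induction segs using evens.induct with
  | case1 => simp [evens]
  | case2 s => norm_num [evens]
  | case3 s s' r ih =>
    have hlen : (s :: s' :: r).length + 1 = r.length + 1 + 2 := by simp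
    rw [hlen, Nat.add_div_right _ (by norm_num), List.range_succ_eq_map]
    simp only [List.map_cons, List.map_map]
    refine congrArg₂ _ ?_ ?_
    · simp
    · show (List.range ((r.length + 1) / 2)).map _ = evens r
      rw [← ih]
      refine List.map_congr_left ?_
      intro k _
      have : (2 : Int) * ((k : Nat) + 1 : Nat) = ((2 * k + 2 : Nat) : Int) := by push_cast; ring
      have h2 : (2 : Int) * ((k : Nat)) = ((2 * k : Nat) : Int) := by push_cast; ring
      simp only [Function.comp, this, h2, PySem.List.pyGetD_natCast]
      simp [List.getD]

lemma sum_map_sub (l : List (List Char)) (f g : List Char → Int) :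
    (l.map f).sum - (l.map g).sum = (l.map (fun s => f s - g s)).sum := by
  induction l with
  | nil => simp
  | cons x xs ih => simp [List.map_cons, List.sum_cons, ← ih]; ring

-- A's pair-fold, reduced to ebal
lemma foldA (segs : List (List Char)) :
    (((PySem.List.pyRange 0 (segs.length : Int) 2).foldl
      (fun (oc : Int × Int) i =>
        (oc.1 + (PySem.Chars.count (PySem.List.pyGetD segs i []) ['('] : Int),
         oc.2 + (PySem.Chars.count (PySem.List.pyGetD segs i []) [')'] : Int))) ((0 : Int), (0 : Int)))).1
    - (((PySem.List.pyRange 0 (segs.length : Int) 2).foldl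
      (fun (oc : Int × Int) i =>
        (oc.1 + (PySem.Chars.count (PySem.List.pyGetD segs i []) ['('] : Int),
         oc.2 + (PySem.Chars.count (PySem.List.pyGetD segs i []) [')'] : Int))) ((0 : Int), (0 : Int)))).2
    = ebal segs := by
  rw [PySem.List.pyRange_of_pos 0 (segs.length : Int) (by norm_num)]
  have hm : (if (0 : Int) < (segs.length : Int)
      then (((segs.length : Int) - 0 + 2 - 1) / 2).toNat else 0) = (segs.length + 1) / 2 := by
    split <;> omega
  rw [hm]
  rw [PySem.List.foldl_prod_mk
    (fun a i => a + (PySem.Chars.count (PySem.List.pyGetD segs i []) ['('] : Int))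
    (fun a i => a + (PySem.Chars.count (PySem.List.pyGetD segs i []) [')'] : Int))]
  simp only [List.foldl_map, PySem.List.foldl_add, zero_add]
  have h1 : ∀ c : Char, ((List.range ((segs.length + 1) / 2)).map
      (fun x : Nat => (↑(PySem.Chars.count (PySem.List.pyGetD segs (2 * ↑x) []) [c]) : Int)))
      = (evens segs).map (fun s => (PySem.Chars.count s [c] : Int)) := by
    intro c
    rw [← range_evens segs, List.map_map]
    refine List.map_congr_left ?_
    intro k _
    simp [Function.comp]
  rw [h1 '(', h1 ')']
  rw [sum_map_sub]
  unfold ebal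
  refine congrArg _ (List.map_congr_left ?_)
  intro s _
  simp [pdelta, count_singleton]

-- ===== VERDICT (by name: the statement is the Claim_ definition above) =====
theorem closeOpen_spec : Claim_equal_closeOpen := by
  intro string _
  unfold Spec_closeOpen
  simp only [closeOpen, closeOpen_alt, splitOn_eq_split0]
  rw [foldA, foldB]
  simp
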